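-- pv_equiv track=rewrite | github.com/miliar/Code_Jam_Webscraper | solutions_python/Problem_181/2025.py | find_last_word
-- ===== SOURCE A (Python) =====
-- def find_last_word(s):
--     if s == '':
--         return ''
--     max_letter = None
--     max_letter_index = []
--     for i,c in enumerate(s):
--         if not max_letter or c > max_letter:
--             max_letter_index = []
--             max_letter = c
--         if c == max_letter:
--             max_letter_index.append(i)
--     best_word = None
--     for max_ind in max_letter_index:
--         word = max_letter + find_last_word(s[:max_ind]) + s[max_ind+1:]
--         if not best_word or word > best_word:
--             best_word = word
--
--     return best_word
-- ===== SOURCE B (Python) =====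
-- def find_last_word(s):
--     dp = ['']
--     for k in range(len(s)):
--         pre = s[:k+1]
--         m = max(pre)
--         best = None
--         for i, c in enumerate(pre):
--             if c == m:
--                 w = m + dp[i] + pre[i+1:]
--                 if not best or w > best:
--                     best = w
--         dp.append(best)
--     return dp[len(s)]
-- ===== Notes on version B (the rewrite author's own statement) =====
-- stated objective: faster
-- what changed: A's recursion over prefixes (branching on every occurrence of the max letter, exponential on repeated letters) is replaced by a bottom-up dynamic-programming table dp[k] = answer for the length-k prefix, filled once in a single pass over prefix lengths.
import Mathlib
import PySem

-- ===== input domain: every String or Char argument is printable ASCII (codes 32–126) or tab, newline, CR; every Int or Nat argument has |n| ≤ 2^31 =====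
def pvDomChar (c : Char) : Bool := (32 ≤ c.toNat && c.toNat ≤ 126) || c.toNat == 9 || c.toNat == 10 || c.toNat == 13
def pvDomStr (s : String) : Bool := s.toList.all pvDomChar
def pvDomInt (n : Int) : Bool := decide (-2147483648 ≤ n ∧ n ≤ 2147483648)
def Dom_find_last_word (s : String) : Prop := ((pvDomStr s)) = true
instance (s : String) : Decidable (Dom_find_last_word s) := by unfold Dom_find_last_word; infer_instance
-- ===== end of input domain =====

-- B replaces A's exponential recursion over the occurrences of the maximum letter by a
-- dynamic-programming table indexed by prefix length (A's recursion only ever visits prefixes).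

-- ===== PORT A =====
-- shared helper: Python's "if not best_word or word > best_word: best_word = word"
-- ('not best_word' is also true for the empty string; '>' is code-point lexicographic)
def pickBetter (b : Option (List Char)) (w : List Char) : Option (List Char) :=
  match b with
  | none => some w
  | some bw => if bw.isEmpty || decide (bw < w) then some w else some bw

-- A's first loop: running max letter and the list of its indices
def scanA (s : List Char) : Option Char × List Int :=
  (PySem.List.enumerate s 0).foldl
    (fun st p =>
      let st1 : Option Char × List Int :=
        match st.1 with
        | none => (some p.2, [])
        | some m => if m < p.2 then (some p.2, []) else st
      if st1.1 = some p.2 then (st1.1, st1.2 ++ [p.1]) else st1)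
    ((none, []) : Option Char × List Int)

-- fuel-guarded transcription of A's recursion (fuel = |s| suffices: calls are on strict prefixes)
def findAgo : Nat → List Char → List Char
  | _, [] => []
  | 0, _ :: _ => []         -- unreachable for fuel ≥ |s|
  | fuel+1, c :: cs =>
    let s := c :: cs
    match scanA s with
    | (none, _) => []       -- unreachable: s is nonempty
    | (some m, idxs) =>
      (idxs.foldl
        (fun b i =>
          pickBetter b
            (m :: findAgo fuel (PySem.List.slice s none (some i))
               ++ PySem.List.slice s (some (i+1)) none))
        none).getD []

def find_last_word (s : String) : String :=
  String.ofList (findAgo s.toList.length s.toList)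

-- ===== PORT B =====
-- one DP step: best rearrangement of the prefix `t`, reading shorter answers from the table `dp`
def bestFor (t : List Char) (dp : List (List Char)) : List Char :=
  match PySem.List.max? t (fun y => y) with
  | none => []              -- unreachable: t is a nonempty prefix
  | some m =>
    ((PySem.List.enumerate t 0).foldl
      (fun b p =>
        if p.2 = m then
          pickBetter b (m :: PySem.List.pyGetD dp p.1 [] ++ PySem.List.slice t (some (p.1+1)) none)
        else b)
      none).getD []

def findB (s : List Char) : List Char :=
  ((List.range s.length).foldl (fun dp k => dp ++ [bestFor (s.take (k+1)) dp]) [[]]).getD s.length []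

def find_last_word_alt (s : String) : String :=
  String.ofList (findB s.toList)

-- ===== PRECONDITION & SPEC =====
def Spec_find_last_word (s : String) (out : String) : Prop := out = find_last_word_alt s
instance (s : String) (out : String) : Decidable (Spec_find_last_word s out) := by unfold Spec_find_last_word; infer_instance

-- ===== CLAIM (what is proved, stated in full; the proofs are below) =====
def Claim_equal_find_last_word : Prop := ∀ (s : String), Dom_find_last_word s → Spec_find_last_word s (find_last_word s)

-- ===== LEMMAS AND PROOFS =====

-- reference data for A's scan: the max letter and the indices carrying it
def maxOf : List Char → Char
  | [] => Char.ofNat 0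
  | c :: cs => cs.foldl max c

def idxOf (s : List Char) : List Int :=
  ((PySem.List.enumerate s 0).filter (fun p => decide (p.2 = maxOf s))).map (·.1)

theorem mem_le_maxOf (s : List Char) (x : Char) (hx : x ∈ s) : x ≤ maxOf s := by
  match s with
  | c :: cs =>
    simp only [maxOf]
    rcases List.mem_cons.1 hx with h | h
    · subst h; exact (PySem.List.le_foldl_max cs x).1
    · exact (PySem.List.le_foldl_max cs c).2 x h

theorem maxOf_append (l : List Char) (a : Char) (hl : l ≠ []) :
    maxOf (l ++ [a]) = max (maxOf l) a := by
  match l with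
  | c :: cs => simp [maxOf, List.foldl_append]

theorem scanA_spec (s : List Char) (h : s ≠ []) :
    scanA s = (some (maxOf s), idxOf s) := by
  induction s using List.reverseRecOn with
  | nil => exact absurd rfl h
  | append_singleton l a ih =>
    by_cases hl : l = []
    · subst hl
      simp [scanA, idxOf, maxOf, PySem.List.enumerate_cons]
    · have hstep : scanA (l ++ [a]) =
        (fun st (p : Int × Char) =>
          let st1 : Option Char × List Int :=
            match st.1 with
            | none => (some p.2, [])
            | some m => if m < p.2 then (some p.2, []) else st
          if st1.1 = some p.2 then (st1.1, st1.2 ++ [p.1]) else st1)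
          (scanA l) ((l.length : Int), a) := by
        simp [scanA, PySem.List.enumerate_append, List.foldl_append]
      rw [hstep, ih hl]
      have henum : PySem.List.enumerate (l ++ [a]) 0
          = PySem.List.enumerate l 0 ++ [((l.length : Int), a)] := by
        simp [PySem.List.enumerate_append, PySem.List.enumerate_cons]
      by_cases hma : maxOf l < a
      · -- new max: a is strictly greater than everything in l
        have h2 : maxOf (l ++ [a]) = a := by
          rw [maxOf_append l a hl]; exact max_eq_right (le_of_lt hma)
        simp only [hma, if_true, idxOf, henum, List.filter_append, h2]
        simp
        intro i b hb
        have hb2 : b ∈ l := by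
          have := PySem.List.map_snd_enumerate (xs := l) (s := 0)
          exact this ▸ List.mem_map_of_mem hb
        intro hba; subst hba
        exact absurd (mem_le_maxOf l b hb2) (not_le.2 hma)
      · have h2 : maxOf (l ++ [a]) = maxOf l := by
          rw [maxOf_append l a hl]; exact max_eq_left (not_lt.1 hma)
        simp only [hma, if_false, idxOf, henum, List.filter_append, h2]
        by_cases hea : a = maxOf l
        · simp [hea]
        · have : (some (maxOf l) = some a) = False := by
            simp; intro he; exact hea he.symm
          simp [hea, this]

theorem mem_idxOf (s : List Char) (i : Int) (hi : i ∈ idxOf s) :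
    ∃ j : Nat, i = (j : Int) ∧ j < s.length := by
  unfold idxOf at hi
  rcases List.mem_map.1 hi with ⟨p, hp, hpi⟩
  have hp' := List.mem_of_mem_filter hp
  rcases (PySem.List.mem_enumerate_iff _ _ _).1 hp' with ⟨k, hk, hpk⟩
  exact ⟨k, by rw [← hpi, hpk]; simp, hk⟩

theorem findAgo_nil (f : Nat) : findAgo f [] = [] := by
  cases f <;> rfl

theorem findAgo_fuel (n : Nat) : ∀ (s : List Char) (f1 f2 : Nat),
    s.length ≤ n → s.length ≤ f1 → s.length ≤ f2 → findAgo f1 s = findAgo f2 s := by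
  induction n with
  | zero =>
    intro s f1 f2 hn _ _
    have : s = [] := List.length_eq_zero_iff.1 (Nat.le_zero.1 hn)
    subst this
    rw [findAgo_nil, findAgo_nil]
  | succ n ih =>
    intro s f1 f2 hn h1 h2
    match s, f1, f2 with
    | [], _, _ => rw [findAgo_nil, findAgo_nil]
    | c :: cs, g1+1, g2+1 =>
      show findAgo (g1+1) (c :: cs) = findAgo (g2+1) (c :: cs)
      rw [findAgo, findAgo, scanA_spec (c :: cs) (by simp)]
      dsimp only
      congr 1
      apply PySem.List.foldl_congr_mem
      intro b i hi
      rcases mem_idxOf (c :: cs) i hi with ⟨j, hij, hj⟩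
      have hd : (c :: cs).length = cs.length + 1 := by simp
      rw [hd] at hj hn h1 h2
      subst hij
      rw [PySem.List.slice_to_natCast]
      have hlen : (List.take j (c :: cs)).length = j := by
        simp [List.length_take]; omega
      have := ih (List.take j (c :: cs)) g1 g2 (by omega) (by omega) (by omega)
      rw [this]

theorem foldl_filter_map {α β σ : Type} (l : List α) (P : α → Prop) [DecidablePred P]
    (h : α → β) (g : σ → β → σ) (init : σ) :
    l.foldl (fun b x => if P x then g b (h x) else b) init
      = ((l.filter (fun x => decide (P x))).map h).foldl g init := by
  induction l generalizing init with
  | nil => rfl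
  | cons a l ih =>
    simp only [List.foldl_cons, List.filter_cons]
    by_cases hp : P a <;> simp [hp, ih]

theorem bestFor_eq (t : List Char) (dp : List (List Char))
    (hdp : ∀ j : Nat, j < t.length → PySem.List.pyGetD dp (j : Int) [] = findAgo (t.take j).length (t.take j)) :
    t ≠ [] → bestFor t dp = findAgo t.length t := by
  match t with
  | [] => intro h; exact absurd rfl h
  | c :: cs =>
    intro _
    have hm : PySem.List.max? (c :: cs) (fun y => y) = some (maxOf (c :: cs)) := by
      rw [PySem.List.max?_id_cons]; rfl
    rw [bestFor, hm]
    dsimp only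
    have hlen : (c :: cs).length = cs.length + 1 := rfl
    rw [hlen, findAgo, scanA_spec _ (by simp)]
    dsimp only
    rw [foldl_filter_map (PySem.List.enumerate (c :: cs) 0) (fun p => p.2 = maxOf (c :: cs)) (·.1)
      (fun b i => pickBetter b (maxOf (c :: cs) :: PySem.List.pyGetD dp i []
        ++ PySem.List.slice (c :: cs) (some (i+1)) none)) none]
    congr 1
    apply PySem.List.foldl_congr_mem
    intro b i hi
    rcases mem_idxOf (c :: cs) i hi with ⟨j, hij, hj⟩
    subst hij
    rw [hlen] at hj
    rw [PySem.List.slice_to_natCast]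
    have h1 : PySem.List.pyGetD dp (j : Int) [] = findAgo ((c :: cs).take j).length ((c :: cs).take j) :=
      hdp j (by rw [hlen]; omega)
    have h2 : findAgo cs.length ((c :: cs).take j) = findAgo ((c :: cs).take j).length ((c :: cs).take j) := by
      apply findAgo_fuel cs.length
      · simp [List.length_take]; omega
      · simp [List.length_take]; omega
      · exact le_rfl
    rw [h1, h2]

theorem dp_inv (s : List Char) (k : Nat) (hk : k ≤ s.length) :
    (List.range k).foldl (fun dp k => dp ++ [bestFor (s.take (k+1)) dp]) [[]]
      = (List.range (k+1)).map (fun i => findAgo (s.take i).length (s.take i)) := by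
  induction k with
  | zero => simp [findAgo_nil]
  | succ k ih =>
    rw [List.range_succ, List.foldl_append, ih (by omega)]
    simp only [List.foldl_cons, List.foldl_nil]
    have hb : bestFor (s.take (k+1)) ((List.range (k+1)).map (fun i => findAgo (s.take i).length (s.take i)))
        = findAgo ((s.take (k+1)).length) (s.take (k+1)) := by
      apply bestFor_eq
      · intro j hj
        have hlt : (s.take (k+1)).length = k+1 := by simp [List.length_take]; omega
        rw [hlt] at hj
        rw [PySem.List.pyGetD_natCast]
        have : ((List.range (k+1)).map (fun i => findAgo (s.take i).length (s.take i))).getD j []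
            = findAgo (s.take j).length (s.take j) := by
          rw [List.getD_eq_getElem _ _ (by simp; omega)]
          simp
        rw [this]
        have htt : (s.take (k+1)).take j = s.take j := by
          rw [List.take_take]; congr 1; omega
        rw [htt]
      · apply List.ne_nil_of_length_pos
        simp [List.length_take]
        omega
    rw [hb, show List.range (k+1+1) = List.range (k+1) ++ [k+1] from List.range_succ, List.map_append]
    rfl

theorem findB_eq (s : List Char) : findB s = findAgo s.length s := by
  rw [findB, dp_inv s s.length le_rfl]
  rw [List.getD_eq_getElem _ _ (by simp)]
  simp

-- ===== VERDICT (by name: the statement is the Claim_ definition above) =====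
theorem find_last_word_spec : Claim_equal_find_last_word := by
  intro s _
  unfold Spec_find_last_word find_last_word find_last_word_alt
  rw [findB_eq]
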